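-- pv_equiv track=rewrite | github.com/izhx/TC-YoukuVSRE | test.py | index_generation
-- ===== SOURCE A (Python) =====
-- def index_generation(crt_i, max_n, N, padding='reflection'):
--     """
--     padding: replicate | reflection | new_info | circle
--     """
--     if max_n < N:
--         padding = 'replicate'
--
--     max_n = max_n - 1
--     n_pad = N // 2
--     return_l = []
--
--     for i in range(crt_i - n_pad, crt_i + n_pad + 1):
--         if i < 0:
--             if padding == 'replicate':
--                 add_idx = 0
--             elif padding == 'reflection':
--                 add_idx = -i
--             elif padding == 'new_info':
--                 add_idx = (crt_i + n_pad) + (-i)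
--             elif padding == 'circle':
--                 add_idx = N + i
--             else:
--                 raise ValueError('Wrong padding mode')
--         elif i > max_n:
--             if padding == 'replicate':
--                 add_idx = max_n
--             elif padding == 'reflection':
--                 add_idx = max_n * 2 - i
--             elif padding == 'new_info':
--                 add_idx = (crt_i - n_pad) - (i - max_n)
--             elif padding == 'circle':
--                 add_idx = i - N
--             else:
--                 raise ValueError('Wrong padding mode')
--         else:
--             add_idx = i
--         return_l.append(add_idx)
--     return return_l
-- ===== SOURCE B (Python) =====
-- def index_generation(crt_i, max_n, N, padding='reflection'):
--     """
--     padding: replicate | reflection | new_info | circle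
--     """
--     if max_n < N:
--         padding = 'replicate'
--     max_n = max_n - 1
--     n_pad = N // 2
--     lo, hi = crt_i - n_pad, crt_i + n_pad
--
--     low_f = {
--         'replicate': lambda i: 0,
--         'reflection': lambda i: -i,
--         'new_info': lambda i: crt_i + n_pad - i,
--         'circle': lambda i: N + i,
--     }
--     high_f = {
--         'replicate': lambda i: max_n,
--         'reflection': lambda i: max_n * 2 - i,
--         'new_info': lambda i: crt_i - n_pad - (i - max_n),
--         'circle': lambda i: i - N,
--     }
--
--     def pad(block, fs):
--         block = list(block)
--         if not block:
--             return []
--         if padding not in fs: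
--             raise ValueError('Wrong padding mode')
--         f = fs[padding]
--         return [f(i) for i in block]
--
--     left = range(lo, min(hi, -1) + 1)
--     mid = range(max(lo, 0), min(hi, max_n) + 1)
--     right = range(max(lo, max(max_n + 1, 0)), hi + 1)
--     return pad(left, low_f) + list(mid) + pad(right, high_f)
-- ===== Notes on version B (the rewrite author's own statement) =====
-- stated objective: alternative
-- what changed: Instead of one loop that re-tests each index's region, B splits the window into three contiguous blocks (left pad, in-range middle, right pad), emits the middle as raw indices and maps a mode-specific padding lambda (from a dict dispatch) over the left and right blocks only, concatenating the results; the mode is validated lazily per non-empty block, left first, so the ValueError fires exactly where A's does.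
import Mathlib
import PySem

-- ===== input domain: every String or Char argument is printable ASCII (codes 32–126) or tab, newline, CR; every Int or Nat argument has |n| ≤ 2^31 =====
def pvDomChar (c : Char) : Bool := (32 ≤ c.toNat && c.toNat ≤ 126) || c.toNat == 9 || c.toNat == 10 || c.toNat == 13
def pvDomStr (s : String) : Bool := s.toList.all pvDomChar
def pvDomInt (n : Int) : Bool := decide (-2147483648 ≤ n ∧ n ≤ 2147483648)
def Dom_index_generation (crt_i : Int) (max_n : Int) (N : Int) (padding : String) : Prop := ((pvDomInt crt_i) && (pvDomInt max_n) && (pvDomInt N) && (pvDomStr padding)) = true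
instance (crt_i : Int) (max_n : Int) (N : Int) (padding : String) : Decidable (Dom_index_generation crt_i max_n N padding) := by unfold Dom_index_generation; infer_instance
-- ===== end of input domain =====

-- B splits the padded window into left/middle/right blocks and maps the mode-specific
-- padding formula only over the pad blocks, instead of A's per-element region test.


-- ===== PORT A =====
-- Literal port of A's loop; the accumulator is Option (List Int), `none` = the ValueError
-- branch (excluded by Pre_); `.getD []` only reads the value on the no-raise inputs.
def index_generation (crt_i : Int) (max_n : Int) (N : Int) (padding : String) : List Int :=
  let padding := if max_n < N then "replicate" else padding
  let max_n := max_n - 1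
  let n_pad := PySem.Int.floordiv N 2
  let step : Option (List Int) → Int → Option (List Int) := fun acc i =>
    match acc with
    | none => none
    | some l =>
      if i < 0 then
        if padding = "replicate" then some (l ++ [0])
        else if padding = "reflection" then some (l ++ [-i])
        else if padding = "new_info" then some (l ++ [(crt_i + n_pad) + (-i)])
        else if padding = "circle" then some (l ++ [N + i])
        else none
      else if i > max_n then
        if padding = "replicate" then some (l ++ [max_n])
        else if padding = "reflection" then some (l ++ [max_n * 2 - i])
        else if padding = "new_info" then some (l ++ [(crt_i - n_pad) - (i - max_n)])
        else if padding = "circle" then some (l ++ [i - N])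
        else none
      else some (l ++ [i])
  ((PySem.List.pyRange (crt_i - n_pad) (crt_i + n_pad + 1) 1).foldl step (some [])).getD []

-- ===== PORT B =====
-- dict dispatch low_f / high_f from Source B: `none` = mode not in the dict (ValueError in pad)
def igLowF (crt_i : Int) (n_pad : Int) (N : Int) (padding : String) : Option (Int → Int) :=
  if padding = "replicate" then some (fun _ => 0)
  else if padding = "reflection" then some (fun i => -i)
  else if padding = "new_info" then some (fun i => crt_i + n_pad - i)
  else if padding = "circle" then some (fun i => N + i)
  else none

def igHighF (crt_i : Int) (n_pad : Int) (N : Int) (max_n : Int) (padding : String) : Option (Int → Int) :=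
  if padding = "replicate" then some (fun _ => max_n)
  else if padding = "reflection" then some (fun i => max_n * 2 - i)
  else if padding = "new_info" then some (fun i => crt_i - n_pad - (i - max_n))
  else if padding = "circle" then some (fun i => i - N)
  else none

-- Source B's `pad`: empty block → []; otherwise look up the mode ([] on the ValueError path,
-- which Pre_ excludes) and map the formula over the block
def igPad (block : List Int) (f? : Option (Int → Int)) : List Int :=
  if block = [] then []
  else match f? with
    | some f => block.map f
    | none => []

def index_generation_alt (crt_i : Int) (max_n : Int) (N : Int) (padding : String) : List Int :=
  let padding := if max_n < N then "replicate" else padding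
  let max_n := max_n - 1
  let n_pad := PySem.Int.floordiv N 2
  let lo := crt_i - n_pad
  let hi := crt_i + n_pad
  let left := PySem.List.pyRange lo (min hi (-1) + 1) 1
  let mid := PySem.List.pyRange (max lo 0) (min hi max_n + 1) 1
  let right := PySem.List.pyRange (max lo (max (max_n + 1) 0)) (hi + 1) 1
  igPad left (igLowF crt_i n_pad N padding) ++ mid
    ++ igPad right (igHighF crt_i n_pad N max_n padding)

-- ===== PRECONDITION & SPEC =====
-- Pre_ excludes exactly the inputs where A raises ValueError ('Wrong padding mode'):
-- an unrecognised mode that is not overridden to 'replicate' while the window actually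
-- contains an out-of-range index. B raises the same error there.
def Pre_index_generation (crt_i : Int) (max_n : Int) (N : Int) (padding : String) : Prop :=
  max_n < N ∨ padding = "replicate" ∨ padding = "reflection" ∨ padding = "new_info"
    ∨ padding = "circle" ∨ N < 0
    ∨ (PySem.Int.floordiv N 2 ≤ crt_i ∧ crt_i + PySem.Int.floordiv N 2 ≤ max_n - 1)
instance (crt_i : Int) (max_n : Int) (N : Int) (padding : String) : Decidable (Pre_index_generation crt_i max_n N padding) := by unfold Pre_index_generation; infer_instance

def pvWitness_index_generation : Int × Int × Int × String := (2, 10, 5, "reflection")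

def Spec_index_generation (crt_i : Int) (max_n : Int) (N : Int) (padding : String) (out : List Int) : Prop := out = index_generation_alt crt_i max_n N padding
instance (crt_i : Int) (max_n : Int) (N : Int) (padding : String) (out : List Int) : Decidable (Spec_index_generation crt_i max_n N padding out) := by unfold Spec_index_generation; infer_instance

-- ===== CLAIM (what is proved, stated in full; the proofs are below) =====
def Claim_equal_index_generation : Prop := ∀ (crt_i : Int) (max_n : Int) (N : Int) (padding : String), Dom_index_generation crt_i max_n N padding → Pre_index_generation crt_i max_n N padding → Spec_index_generation crt_i max_n N padding (index_generation crt_i max_n N padding)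

-- ===== LEMMAS AND PROOFS =====

-- A's loop, when every step appends g i, computes the map of g over the range
lemma pv_fold_map (step : Option (List Int) → Int → Option (List Int)) (g : Int → Int)
    (r : List Int) (h : ∀ l i, i ∈ r → step (some l) i = some (l ++ [g i])) :
    ∀ l : List Int, r.foldl step (some l) = some (l ++ r.map g) := by
  induction r with
  | nil => intro l; simp [List.foldl]
  | cons a r ih =>
    intro l
    simp only [List.foldl, List.map]
    rw [h l a (by simp)]
    rw [ih (fun l i hi => h l i (by simp [hi])) (l ++ [g a])]
    simp

-- the three-block split of the mapped window
lemma pv_split3 (m : Int) (flow fhigh : Int → Int) : ∀ n : Nat, ∀ a b : Int, (b - a).toNat = n →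
    (PySem.List.pyRange a b 1).map
        (fun i => if i < 0 then flow i else if i > m then fhigh i else i)
      = (PySem.List.pyRange a (min b 0) 1).map flow
        ++ PySem.List.pyRange (max a 0) (min b (m + 1)) 1
        ++ (PySem.List.pyRange (max a (max (m + 1) 0)) b 1).map fhigh := by
  intro n
  induction n with
  | zero =>
    intro a b hn
    have hba : b ≤ a := by omega
    rw [PySem.List.pyRange_one_eq_nil hba,
        PySem.List.pyRange_one_eq_nil (a := a) (b := min b 0) (by omega),
        PySem.List.pyRange_one_eq_nil (a := max a 0) (b := min b (m + 1)) (by omega),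
        PySem.List.pyRange_one_eq_nil (a := max a (max (m + 1) 0)) (b := b) (by omega)]
    simp
  | succ n ih =>
    intro a b hn
    have hab : a < b := by omega
    rw [PySem.List.pyRange_one_cons hab]
    by_cases h0 : a < 0
    · -- left pad element
      rw [PySem.List.pyRange_one_cons (a := a) (b := min b 0) (by omega)]
      have e1 : max a 0 = max (a + 1) 0 := by omega
      have e2 : max a (max (m + 1) 0) = max (a + 1) (max (m + 1) 0) := by omega
      simp only [List.map, h0, if_pos, e1, e2]
      rw [ih (a + 1) b (by omega)]
      simp [h0]
    · by_cases hm : a > m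
      · -- right pad element
        rw [PySem.List.pyRange_one_eq_nil (a := a) (b := min b 0) (by omega),
            PySem.List.pyRange_one_eq_nil (a := max a 0) (b := min b (m + 1)) (by omega)]
        have e3 : max a (max (m + 1) 0) = a := by omega
        rw [e3, PySem.List.pyRange_one_cons hab]
        have e1 : max (a + 1) 0 = a + 1 := by omega
        have e2 : max (a + 1) (max (m + 1) 0) = a + 1 := by omega
        have := ih (a + 1) b (by omega)
        rw [PySem.List.pyRange_one_eq_nil (a := a + 1) (b := min b 0) (by omega), e1, e2] at this
        rw [PySem.List.pyRange_one_eq_nil (a := a + 1) (b := min b (m + 1)) (by omega)] at this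
        simp only [List.nil_append, List.map] at this ⊢
        rw [this]
        simp [h0, hm]
      · -- middle element
        rw [PySem.List.pyRange_one_eq_nil (a := a) (b := min b 0) (by omega)]
        have e0 : max a 0 = a := by omega
        rw [e0, PySem.List.pyRange_one_cons (a := a) (b := min b (m + 1)) (by omega)]
        have e1 : max (a + 1) 0 = a + 1 := by omega
        have e2 : max a (max (m + 1) 0) = max (a + 1) (max (m + 1) 0) := by omega
        have := ih (a + 1) b (by omega)
        rw [PySem.List.pyRange_one_eq_nil (a := a + 1) (b := min b 0) (by omega), e1] at this
        simp only [List.map_nil, List.nil_append] at this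
        simp only [List.map, h0, hm, e2]
        rw [this]
        simp

-- N < 0 makes N // 2 negative (empty window)
lemma pv_floordiv_neg {N : Int} (h : N < 0) : PySem.Int.floordiv N 2 < 0 := by
  have := PySem.Int.floordiv_mul_add_mod N 2
  have h2 : 0 ≤ PySem.Int.mod N 2 ∧ PySem.Int.mod N 2 < 2 := by
    constructor
    · exact PySem.Int.mod_nonneg N (by omega : (0:Int) < 2)
    · exact PySem.Int.mod_lt N (by omega : (0:Int) < 2)
  omega

lemma pv_igPad_some (l : List Int) (f : Int → Int) : igPad l (some f) = l.map f := by
  unfold igPad; split <;> simp_all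

-- main equivalence
lemma pv_main (crt_i max_n N : Int) (padding : String)
    (hpre : Pre_index_generation crt_i max_n N padding) :
    index_generation crt_i max_n N padding = index_generation_alt crt_i max_n N padding := by
  simp only [index_generation, index_generation_alt]
  set p : String := if max_n < N then "replicate" else padding with hp
  set m : Int := max_n - 1 with hm
  set np : Int := PySem.Int.floordiv N 2 with hnp
  set lo : Int := crt_i - np with hlo
  set hi : Int := crt_i + np with hhi
  by_cases hv : p = "replicate" ∨ p = "reflection" ∨ p = "new_info" ∨ p = "circle"
  · -- valid mode: both sides are the three-block map
    obtain ⟨flow, fhigh, hfl, hfh, hstep⟩ :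
        ∃ flow fhigh : Int → Int,
          igLowF crt_i np N p = some flow ∧ igHighF crt_i np N m p = some fhigh ∧
          ∀ (l : List Int) (i : Int),
            (if i < 0 then
              if p = "replicate" then some (l ++ [0])
              else if p = "reflection" then some (l ++ [-i])
              else if p = "new_info" then some (l ++ [(crt_i + np) + (-i)])
              else if p = "circle" then some (l ++ [N + i])
              else none
            else if i > m then
              if p = "replicate" then some (l ++ [m])
              else if p = "reflection" then some (l ++ [m * 2 - i])
              else if p = "new_info" then some (l ++ [(crt_i - np) - (i - m)])
              else if p = "circle" then some (l ++ [i - N])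
              else none
            else some (l ++ [i]))
            = some (l ++ [if i < 0 then flow i else if i > m then fhigh i else i]) := by
      rcases hv with hv | hv | hv | hv <;>
        [ exact ⟨fun _ => 0, fun _ => m, by simp [igLowF, hv], by simp [igHighF, hv],
            by intro l i; simp only [hv]; by_cases h0 : i < 0 <;> by_cases h1 : i > m <;> simp [h0, h1]⟩;
          exact ⟨fun i => -i, fun i => m * 2 - i, by simp [igLowF, hv], by simp [igHighF, hv],
            by intro l i; simp only [hv]; by_cases h0 : i < 0 <;> by_cases h1 : i > m <;> simp [h0, h1]⟩;
          exact ⟨fun i => crt_i + np - i, fun i => crt_i - np - (i - m),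
            by simp [igLowF, hv], by simp [igHighF, hv],
            by intro l i; simp only [hv]; by_cases h0 : i < 0 <;> by_cases h1 : i > m <;> simp [h0, h1] <;> ring⟩;
          exact ⟨fun i => N + i, fun i => i - N, by simp [igLowF, hv], by simp [igHighF, hv],
            by intro l i; simp only [hv]; by_cases h0 : i < 0 <;> by_cases h1 : i > m <;> simp [h0, h1]⟩ ]
    rw [pv_fold_map _ (fun i => if i < 0 then flow i else if i > m then fhigh i else i)
          _ (fun l i _ => hstep l i) []]
    simp only [List.nil_append, Option.getD_some]
    rw [pv_split3 m flow fhigh ((hi + 1) - lo).toNat lo (hi + 1) rfl]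
    have emin : min hi (-1) + 1 = min (hi + 1) 0 := by omega
    have emid : min hi m + 1 = min (hi + 1) (m + 1) := by omega
    rw [hfl, hfh, pv_igPad_some, pv_igPad_some, emin, emid]
  · -- invalid mode survived the override: Pre_ forces an empty or fully in-range window
    have hnlt : ¬ max_n < N := by
      intro h; apply hv; left; rw [hp]; simp [h]
    have hpe : p = padding := by rw [hp]; simp [hnlt]
    have hcase : N < 0 ∨ (np ≤ crt_i ∧ crt_i + np ≤ max_n - 1) := by
      rcases hpre with h | h | h | h | h | h | h
      · exact absurd h hnlt
      · exact absurd (by rw [hpe]; exact h) (fun h' => hv (Or.inl h'))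
      · exact absurd (by rw [hpe]; exact h) (fun h' => hv (Or.inr (Or.inl h')))
      · exact absurd (by rw [hpe]; exact h) (fun h' => hv (Or.inr (Or.inr (Or.inl h'))))
      · exact absurd (by rw [hpe]; exact h) (fun h' => hv (Or.inr (Or.inr (Or.inr h'))))
      · exact Or.inl h
      · exact Or.inr h
    rcases hcase with hN | ⟨h1, h2⟩
    · -- empty window on both sides
      have hnpneg : np < 0 := pv_floordiv_neg hN
      rw [PySem.List.pyRange_one_eq_nil (a := lo) (b := hi + 1) (by omega),
          PySem.List.pyRange_one_eq_nil (a := lo) (b := min hi (-1) + 1) (by omega),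
          PySem.List.pyRange_one_eq_nil (a := max lo 0) (b := min hi m + 1) (by omega),
          PySem.List.pyRange_one_eq_nil (a := max lo (max (m + 1) 0)) (b := hi + 1) (by omega)]
      simp [igPad]
    · -- fully in-range window: every element is emitted unchanged
      rw [pv_fold_map _ (fun i => i) _ (fun l i hi' => by
            have := (PySem.List.mem_pyRange_one).1 hi'
            have hge : ¬ i < 0 := by omega
            have hle : ¬ i > m := by omega
            simp [hge, hle]) []]
      simp only [List.nil_append, Option.getD_some, List.map_id']
      rw [PySem.List.pyRange_one_eq_nil (a := lo) (b := min hi (-1) + 1) (by omega),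
          PySem.List.pyRange_one_eq_nil (a := max lo (max (m + 1) 0)) (b := hi + 1) (by omega)]
      have e0 : max lo 0 = lo := by omega
      have e1 : min hi m + 1 = hi + 1 := by omega
      rw [e0, e1]
      simp [igPad]

-- ===== VERDICT (by name: the statement is the Claim_ definition above) =====
theorem index_generation_spec : Claim_equal_index_generation := by
  intro crt_i max_n N padding _ hpre
  unfold Spec_index_generation
  exact pv_main crt_i max_n N padding hpre
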